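-- pv_equiv track=rewrite | github.com/MAHNOOR80/HAKATHON0_GOLD_TIER | ralph_wrapper.py | parse_summary_and_remaining
-- ===== SOURCE A (Python) =====
-- def parse_summary_and_remaining(output: str) -> tuple[str, str]:
--     """Extract accomplishment summary and remaining work from Claude output."""
--     summary = ""
--     remaining = ""
--
--     # Look for structured sections Claude may produce
--     lines = output.strip().splitlines()
--     capture_remaining = False
--     summary_lines = []
--     remaining_lines = []
--
--     for line in lines:
--         lower = line.lower().strip()
--         if "remaining" in lower or "left to do" in lower or "still need" in lower:
--             capture_remaining = True
--             continue
--         if capture_remaining: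
--             remaining_lines.append(line)
--         else:
--             summary_lines.append(line)
--
--     # Keep summaries concise (last 30 lines at most)
--     summary = "\n".join(summary_lines[-30:])
--     remaining = "\n".join(remaining_lines[-15:]) if remaining_lines else ""
--
--     return summary, remaining
-- ===== SOURCE B (Python) =====
-- def parse_summary_and_remaining(output: str) -> tuple[str, str]:
--     """Extract accomplishment summary and remaining work from Claude output."""
--     def is_marker(line):
--         low = line.lower().strip()
--         return "remaining" in low or "left to do" in low or "still need" in low
--
--     lines = output.strip().splitlines()
--     idx = next((i for i, l in enumerate(lines) if is_marker(l)), None)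
--     if idx is None:
--         summary_lines, remaining_lines = lines, []
--     else:
--         summary_lines = lines[:idx]
--         remaining_lines = [l for l in lines[idx + 1:] if not is_marker(l)]
--     summary = "\n".join(summary_lines[-30:])
--     remaining = "\n".join(remaining_lines[-15:]) if remaining_lines else ""
--     return summary, remaining
-- ===== Notes on version B (the rewrite author's own statement) =====
-- stated objective: simpler
-- what changed: Replaces the stateful capture-flag loop by a declarative decomposition: find the index of the first marker line, slice the summary before it, and filter the remaining markers out of the suffix.
import Mathlib
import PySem

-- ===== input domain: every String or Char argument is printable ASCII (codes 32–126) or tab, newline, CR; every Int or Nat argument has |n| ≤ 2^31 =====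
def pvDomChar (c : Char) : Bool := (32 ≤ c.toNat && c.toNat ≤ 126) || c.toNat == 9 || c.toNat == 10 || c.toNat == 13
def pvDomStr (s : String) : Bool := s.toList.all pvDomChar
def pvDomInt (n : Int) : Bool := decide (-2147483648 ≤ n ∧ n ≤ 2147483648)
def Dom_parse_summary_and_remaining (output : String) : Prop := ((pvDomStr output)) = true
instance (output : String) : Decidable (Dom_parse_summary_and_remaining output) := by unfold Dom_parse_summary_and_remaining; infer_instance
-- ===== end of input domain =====

-- B replaces A's stateful capture-flag loop by a declarative decomposition (find the first marker line, slice before it, filter markers out of the suffix); same cost, simpler.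

-- ===== PORT A =====
-- A's loop body: the state is (capture_remaining, summary_lines, remaining_lines)
def pvStepA (st : Bool × List String × List String) (line : String) : Bool × List String × List String :=
  let lower := PySem.Str.strip (PySem.Str.lower line)
  if PySem.Str.isIn "remaining" lower || PySem.Str.isIn "left to do" lower || PySem.Str.isIn "still need" lower then
    (true, st.2.1, st.2.2)
  else if st.1 then
    (st.1, st.2.1, st.2.2 ++ [line])
  else
    (st.1, st.2.1 ++ [line], st.2.2)

def parse_summary_and_remaining (output : String) : String × String :=
  let lines := PySem.Str.splitlines (PySem.Str.strip output)
  let st := lines.foldl pvStepA (false, [], [])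
  let summary := PySem.Str.join "\n" (PySem.List.slice st.2.1 (some (-30)) none)
  let remaining := if st.2.2 ≠ [] then PySem.Str.join "\n" (PySem.List.slice st.2.2 (some (-15)) none) else ""
  (summary, remaining)

-- ===== PORT B =====
def pvIsMarker (line : String) : Bool :=
  let low := PySem.Str.strip (PySem.Str.lower line)
  PySem.Str.isIn "remaining" low || PySem.Str.isIn "left to do" low || PySem.Str.isIn "still need" low

def parse_summary_and_remaining_alt (output : String) : String × String :=
  let lines := PySem.Str.splitlines (PySem.Str.strip output)
  let parts : List String × List String :=
    match lines.findIdx? pvIsMarker with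
    | none => (lines, [])
    | some i => (PySem.List.slice lines none (some (i : Int)),
                 (PySem.List.slice lines (some ((i : Int) + 1)) none).filter (fun l => !pvIsMarker l))
  let summary := PySem.Str.join "\n" (PySem.List.slice parts.1 (some (-30)) none)
  let remaining := if parts.2 ≠ [] then PySem.Str.join "\n" (PySem.List.slice parts.2 (some (-15)) none) else ""
  (summary, remaining)

-- ===== PRECONDITION & SPEC =====
def Spec_parse_summary_and_remaining (output : String) (out : String × String) : Prop := out = parse_summary_and_remaining_alt output
instance (output : String) (out : String × String) : Decidable (Spec_parse_summary_and_remaining output out) := by unfold Spec_parse_summary_and_remaining; infer_instance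

-- ===== CLAIM (what is proved, stated in full; the proofs are below) =====
def Claim_equal_parse_summary_and_remaining : Prop := ∀ (output : String), Dom_parse_summary_and_remaining output → Spec_parse_summary_and_remaining output (parse_summary_and_remaining output)

-- ===== LEMMAS AND PROOFS =====

-- A's step restated via B's marker predicate (the two tests are syntactically identical).
theorem pvStepA_eq (st : Bool × List String × List String) (line : String) :
    pvStepA st line =
      if pvIsMarker line then (true, st.2.1, st.2.2)
      else if st.1 then (st.1, st.2.1, st.2.2 ++ [line])
      else (st.1, st.2.1 ++ [line], st.2.2) := rfl

-- Once capture_remaining is true, A's loop appends every non-marker line to remaining_lines.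
theorem pvFoldA_true (lines : List String) (s r : List String) :
    lines.foldl pvStepA (true, s, r) = (true, s, r ++ lines.filter (fun l => !pvIsMarker l)) := by
  induction lines generalizing r with
  | nil => simp
  | cons l ls ih =>
    rw [List.foldl_cons, pvStepA_eq]
    by_cases h : pvIsMarker l
    · simp [h, ih]
    · simp [h, ih]

-- Before the first marker A's loop appends to summary_lines; the first marker flips the flag for good.
theorem pvFoldA_false (lines : List String) (s r : List String) :
    lines.foldl pvStepA (false, s, r) =
      match lines.findIdx? pvIsMarker with
      | none => (false, s ++ lines, r)
      | some i => (true, s ++ lines.take i, r ++ (lines.drop (i + 1)).filter (fun l => !pvIsMarker l)) := by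
  induction lines generalizing s with
  | nil => simp
  | cons l ls ih =>
    rw [List.foldl_cons, pvStepA_eq, List.findIdx?_cons]
    by_cases h : pvIsMarker l
    · simp [h, pvFoldA_true]
    · cases hf : ls.findIdx? pvIsMarker with
      | none => simp [h, ih, hf]
      | some i => simp [h, ih, hf]

-- When there is no marker line, A's final state carries all lines as summary and nothing remaining.
theorem pvParts_none (lines : List String) (hf : lines.findIdx? pvIsMarker = none) :
    (lines.foldl pvStepA (false, [], [])).2.1 = lines ∧ (lines.foldl pvStepA (false, [], [])).2.2 = [] := by
  rw [pvFoldA_false, hf]; exact ⟨by simp, rfl⟩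

-- With the first marker at index i, A's final state is exactly B's slice and filtered slice.
theorem pvParts_some (lines : List String) (i : Nat) (hf : lines.findIdx? pvIsMarker = some i) :
    (lines.foldl pvStepA (false, [], [])).2.1 = PySem.List.slice lines none (some (i : Int)) ∧
    (lines.foldl pvStepA (false, [], [])).2.2 = (PySem.List.slice lines (some ((i : Int) + 1)) none).filter (fun l => !pvIsMarker l) := by
  rw [pvFoldA_false, hf]
  have h1 : ((i : Int) + 1) = ((i + 1 : Nat) : Int) := by push_cast; ring
  rw [h1, PySem.List.slice_to_natCast, PySem.List.slice_from_natCast]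
  exact ⟨by simp, by simp⟩

-- ===== VERDICT (by name: the statement is the Claim_ definition above) =====
theorem parse_summary_and_remaining_spec : Claim_equal_parse_summary_and_remaining := by
  intro output _
  unfold Spec_parse_summary_and_remaining parse_summary_and_remaining parse_summary_and_remaining_alt
  cases hf : (PySem.Str.splitlines (PySem.Str.strip output)).findIdx? pvIsMarker with
  | none =>
    obtain ⟨h1, h2⟩ := pvParts_none _ hf
    simp only [hf, h1, h2]
  | some i =>
    obtain ⟨h1, h2⟩ := pvParts_some _ _ hf
    simp only [hf, h1, h2]
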